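-- pv_equiv track=rewrite | github.com/Li-Evan/Bloom-one-vs-one-study | backend/app/courses.py | _count_mastery_items
-- ===== SOURCE A (Python) =====
-- def _count_mastery_items(syllabus_content: str) -> tuple[int, int]:
--     """Count (checked, total) mastery checkbox items in syllabus."""
--     checked = 0
--     total = 0
--     for line in syllabus_content.split("\n"):
--         stripped = line.strip()
--         if stripped.startswith("- [ ]"):
--             total += 1
--         elif stripped.startswith("- [x]") or stripped.startswith("- [X]"):
--             checked += 1
--             total += 1
--     return checked, total
-- ===== SOURCE B (Python) =====
-- import re
--
-- # One multiline regex pass over the whole text instead of splitting into lines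
-- # and branching on stripped prefixes.  Within the printable-ASCII(+tab/CR/NL)
-- # domain, `^[ \t\n\r]*` reproduces `line.strip()` leading-whitespace removal,
-- # and the captured state char distinguishes checked from unchecked boxes.
-- _CHECKBOX = re.compile(r'^[ \t\n\r]*- \[([ xX])\]', re.MULTILINE)
--
-- def _count_mastery_items(syllabus_content: str) -> tuple[int, int]:
--     states = _CHECKBOX.findall(syllabus_content)
--     checked = sum(1 for c in states if c in 'xX')
--     return checked, len(states)
-- ===== Notes on version B (the rewrite author's own statement) =====
-- stated objective: idiomatic
-- what changed: Replaces the explicit line loop with strip()/startswith() prefix branches by a single re.MULTILINE regex findall over the whole text that captures each checkbox's state character, then counts the captures.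
import Mathlib
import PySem

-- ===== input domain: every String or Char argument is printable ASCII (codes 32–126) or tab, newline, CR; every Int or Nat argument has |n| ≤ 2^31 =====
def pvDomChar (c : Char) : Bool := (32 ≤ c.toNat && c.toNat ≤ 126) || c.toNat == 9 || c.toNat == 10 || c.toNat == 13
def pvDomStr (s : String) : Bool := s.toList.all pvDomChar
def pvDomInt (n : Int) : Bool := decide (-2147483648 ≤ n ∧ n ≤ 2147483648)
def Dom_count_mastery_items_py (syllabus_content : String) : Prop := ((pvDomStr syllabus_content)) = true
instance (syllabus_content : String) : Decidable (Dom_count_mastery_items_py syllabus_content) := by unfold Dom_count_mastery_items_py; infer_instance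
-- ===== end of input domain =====

-- B replaces A's per-line strip/startswith loop by one multiline-regex findall
-- over the whole text (objective: idiomatic); A and B are proved to return the
-- same pair on every domain input.


-- ===== PORT A =====
-- literal port of A: split on '\n', strip each line, branch on the three prefixes
def count_mastery_items_py (syllabus_content : String) : Int × Int :=
  List.foldl
    (fun (acc : Int × Int) (line : List Char) =>
      let stripped := PySem.Chars.strip line
      if PySem.Chars.startswith stripped ['-', ' ', '[', ' ', ']'] then
        (acc.1, acc.2 + 1)
      else if PySem.Chars.startswith stripped ['-', ' ', '[', 'x', ']'] ||
              PySem.Chars.startswith stripped ['-', ' ', '[', 'X', ']'] then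
        (acc.1 + 1, acc.2 + 1)
      else acc)
    (0, 0) (PySem.Chars.splitOn syllabus_content.toList ['\n'])

-- ===== PORT B =====
-- hand port of B's regex r'^[ \t\n\r]*- \[([ xX])\]' with re.MULTILINE: each match is
-- anchored at a line start, so findall yields exactly one capture (the state char) per
-- line whose [ \t\n\r]*-stripped prefix is a checkbox; exact on the stated ASCII domain.
def pvIsWs (c : Char) : Bool := c.toNat == 32 || c.toNat == 9 || c.toNat == 10 || c.toNat == 13

def pvMatchState (line : List Char) : Option Char :=
  match line.dropWhile pvIsWs with
  | a :: b :: e :: c :: f :: _ =>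
      if a = '-' && b = ' ' && e = '[' && (c = ' ' || c = 'x' || c = 'X') && f = ']' then
        some c
      else none
  | _ => none

def count_mastery_items_py_alt (syllabus_content : String) : Int × Int :=
  let states := (PySem.Chars.splitOn syllabus_content.toList ['\n']).filterMap pvMatchState
  ((states.countP (fun c => c = 'x' || c = 'X') : Int), (states.length : Int))

-- ===== PRECONDITION & SPEC =====
def Spec_count_mastery_items_py (syllabus_content : String) (out : Int × Int) : Prop := out = count_mastery_items_py_alt syllabus_content
instance (syllabus_content : String) (out : Int × Int) : Decidable (Spec_count_mastery_items_py syllabus_content out) := by unfold Spec_count_mastery_items_py; infer_instance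

-- ===== CLAIM (what is proved, stated in full; the proofs are below) =====
def Claim_equal_count_mastery_items_py : Prop := ∀ (syllabus_content : String), Dom_count_mastery_items_py syllabus_content → Spec_count_mastery_items_py syllabus_content (count_mastery_items_py syllabus_content)

-- ===== LEMMAS AND PROOFS =====

-- on domain characters Python's isspace coincides with the regex class [ \t\n\r]
theorem pvIsspace_eq_pvIsWs (c : Char) (h : pvDomChar c = true) :
    PySem.Chars.isspace c = pvIsWs c := by
  unfold pvDomChar at h
  unfold PySem.Chars.isspace pvIsWs
  rw [Bool.eq_iff_iff]
  simp only [Bool.or_eq_true, Bool.and_eq_true, decide_eq_true_eq, beq_iff_eq] at *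
  omega

theorem pvDropWhile_congr (l : List Char) (h : ∀ c ∈ l, pvDomChar c = true) :
    l.dropWhile PySem.Chars.isspace = l.dropWhile pvIsWs := by
  induction l with
  | nil => rfl
  | cons a t ih =>
      have ha := pvIsspace_eq_pvIsWs a (h a (by simp))
      simp only [List.dropWhile_cons, ha]
      split
      · exact ih (fun c hc => h c (by simp [hc]))
      · rfl

-- rstrip only removes trailing whitespace, so a prefix ending in a
-- non-whitespace character survives it
theorem pvStartswith_rstrip (d q : List Char) (c : Char)
    (hc : PySem.Chars.isspace c = false) :
    PySem.Chars.startswith (PySem.Chars.rstrip d) (q ++ [c]) =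
      PySem.Chars.startswith d (q ++ [c]) := by
  rw [Bool.eq_iff_iff, PySem.Chars.startswith_iff, PySem.Chars.startswith_iff]
  constructor
  · intro hpre
    refine hpre.trans ?_
    unfold PySem.Chars.rstrip
    have h := List.reverse_prefix.mpr
      (List.dropWhile_suffix (p := PySem.Chars.isspace) (l := d.reverse))
    simpa using h
  · rintro ⟨r, hr⟩
    subst hr
    unfold PySem.Chars.rstrip
    rw [List.reverse_append, List.reverse_append]
    simp only [List.reverse_singleton]
    rw [List.dropWhile_append]
    split
    · simp [hc]
    · refine ⟨(List.dropWhile PySem.Chars.isspace r.reverse).reverse, ?_⟩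
      simp [List.reverse_append, List.append_assoc]

-- the per-line step of A equals the per-line regex match of B
theorem pvStep_eq (l : List Char) (hl : ∀ c ∈ l, pvDomChar c = true) (acc : Int × Int) :
    (let stripped := PySem.Chars.strip l
     if PySem.Chars.startswith stripped ['-', ' ', '[', ' ', ']'] then
       (acc.1, acc.2 + 1)
     else if PySem.Chars.startswith stripped ['-', ' ', '[', 'x', ']'] ||
             PySem.Chars.startswith stripped ['-', ' ', '[', 'X', ']'] then
       (acc.1 + 1, acc.2 + 1)
     else acc)
    = (match pvMatchState l with
       | some c => (acc.1 + (if c = 'x' || c = 'X' then (1 : Int) else 0), acc.2 + 1)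
       | none => acc) := by
  have hstrip : PySem.Chars.strip l = PySem.Chars.rstrip (l.dropWhile pvIsWs) := by
    unfold PySem.Chars.strip PySem.Chars.lstrip
    rw [pvDropWhile_congr l hl]
  rw [show (['-', ' ', '[', ' ', ']'] : List Char) = ['-', ' ', '[', ' '] ++ [']'] from rfl,
      show (['-', ' ', '[', 'x', ']'] : List Char) = ['-', ' ', '[', 'x'] ++ [']'] from rfl,
      show (['-', ' ', '[', 'X', ']'] : List Char) = ['-', ' ', '[', 'X'] ++ [']'] from rfl]
  simp only [hstrip, pvStartswith_rstrip _ _ ']' (by decide)]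
  unfold pvMatchState
  rcases l.dropWhile pvIsWs with _ | ⟨a, _ | ⟨b, _ | ⟨e, _ | ⟨f, _ | ⟨g, rest⟩⟩⟩⟩⟩ <;>
    simp only [PySem.Chars.startswith, Bool.and_eq_true] <;>
    try simp
  simp only [@eq_comm Char '-' a, @eq_comm Char ' ' b, @eq_comm Char '[' e,
    @eq_comm Char ' ' f, @eq_comm Char 'x' f, @eq_comm Char 'X' f, @eq_comm Char ']' g]
  by_cases ha : a = '-' <;> by_cases hb : b = ' ' <;> by_cases he : e = '[' <;>
    by_cases hg : g = ']' <;> by_cases hf1 : f = ' ' <;> by_cases hf2 : f = 'x' <;>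
    by_cases hf3 : f = 'X' <;> first | rfl | simp_all

-- every character of every piece of splitOn.go comes from l, cur or acc
theorem pvSplitGo_chars (sep : List Char) :
    ∀ (fuel : Nat) (l cur : List Char) (acc : List (List Char)),
      ∀ p ∈ PySem.Chars.splitOn.go sep fuel l cur acc,
        ∀ c ∈ p, c ∈ l ∨ c ∈ cur ∨ ∃ q, q ∈ acc ∧ c ∈ q := by
  intro fuel
  induction fuel with
  | zero =>
      intro l cur acc p hp c hc
      unfold PySem.Chars.splitOn.go at hp
      simp only [List.mem_reverse, List.mem_cons] at hp
      rcases hp with hp | hp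
      · subst hp
        rcases List.mem_append.mp hc with h | h
        · exact Or.inr (Or.inl (List.mem_reverse.mp h))
        · exact Or.inl h
      · exact Or.inr (Or.inr ⟨p, hp, hc⟩)
  | succ fuel ih =>
      intro l cur acc p hp c hc
      match l with
      | [] =>
          unfold PySem.Chars.splitOn.go at hp
          simp only [List.mem_reverse, List.mem_cons] at hp
          rcases hp with hp | hp
          · subst hp
            exact Or.inr (Or.inl (List.mem_reverse.mp hc))
          · exact Or.inr (Or.inr ⟨p, hp, hc⟩)
      | x :: rest =>
          unfold PySem.Chars.splitOn.go at hp
          split at hp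
          · rcases ih _ _ _ p hp c hc with h | h | ⟨q, hq, hcq⟩
            · exact Or.inl (List.mem_of_mem_drop h)
            · simp at h
            · rcases List.mem_cons.mp hq with hq' | hq'
              · subst hq'
                exact Or.inr (Or.inl (List.mem_reverse.mp hcq))
              · exact Or.inr (Or.inr ⟨q, hq', hcq⟩)
          · rcases ih _ _ _ p hp c hc with h | h | ⟨q, hq, hcq⟩
            · exact Or.inl (List.mem_cons_of_mem _ h)
            · rcases List.mem_cons.mp h with h' | h'
              · exact Or.inl (by simp [h'])
              · exact Or.inr (Or.inl h')
            · exact Or.inr (Or.inr ⟨q, hq, hcq⟩)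

theorem pvSplitOn_chars (s sep : List Char) (p : List Char)
    (hp : p ∈ PySem.Chars.splitOn s sep) {c : Char} (hc : c ∈ p) : c ∈ s := by
  unfold PySem.Chars.splitOn at hp
  rcases pvSplitGo_chars sep _ _ _ _ p hp c hc with h | h | ⟨q, hq, _⟩
  · exact h
  · simp at h
  · simp at hq

-- folding A's step over the lines computes B's counts, shifted by the accumulator
theorem pvFold_eq (lines : List (List Char))
    (hl : ∀ p ∈ lines, ∀ c ∈ p, pvDomChar c = true) (acc : Int × Int) :
    List.foldl
      (fun (acc : Int × Int) (line : List Char) =>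
        let stripped := PySem.Chars.strip line
        if PySem.Chars.startswith stripped ['-', ' ', '[', ' ', ']'] then
          (acc.1, acc.2 + 1)
        else if PySem.Chars.startswith stripped ['-', ' ', '[', 'x', ']'] ||
                PySem.Chars.startswith stripped ['-', ' ', '[', 'X', ']'] then
          (acc.1 + 1, acc.2 + 1)
        else acc)
      acc lines
    = (acc.1 + ((lines.filterMap pvMatchState).countP (fun c => c = 'x' || c = 'X') : Int),
       acc.2 + ((lines.filterMap pvMatchState).length : Int)) := by
  induction lines generalizing acc with
  | nil => simp
  | cons l t ih =>
      rw [List.foldl_cons, pvStep_eq l (hl l (by simp)) acc,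
          ih (fun p hp c hc => hl p (by simp [hp]) c hc)]
      cases hm : pvMatchState l with
      | none => simp [hm]
      | some c =>
          simp only [List.filterMap_cons, hm, List.countP_cons, List.length_cons]
          by_cases hc : (c = 'x' || c = 'X') = true <;>
            simp [hc, Prod.ext_iff] <;> omega

-- ===== VERDICT (by name: the statement is the Claim_ definition above) =====
theorem count_mastery_items_py_spec : Claim_equal_count_mastery_items_py := by
  intro s hdom
  unfold Spec_count_mastery_items_py count_mastery_items_py count_mastery_items_py_alt
  rw [pvFold_eq]
  · simp
  · intro p hp c hc
    unfold Dom_count_mastery_items_py pvDomStr at hdom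
    exact (List.all_eq_true.mp hdom) c (pvSplitOn_chars _ _ p hp hc)
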